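-- pv_equiv track=rewrite | github.com/dev-bong/algorithms | programmers/correct/lv_2/멀쩡한_사각형.py | solution
-- ===== SOURCE A (Python) =====
-- def gcd(a, b): # 최대공약수
--     for i in range(a, 0, -1):
--         if a % i == 0 and b % i == 0:
--             return i
--
-- def solution(w,h):
--     total_square = w * h
--
--     #! 시간 감축
--     wh = [w, h]
--     wh.sort()
--     w = wh[0]
--     h = wh[1]
--
--     g = gcd(w, h)
--     rmv_square = 0
--     hg = h // g
--     wg = w // g
--
--     for i in range(1, wg + 1):
--         if i - 1 == 0:
--             floor_ex = 0
--         else: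
--             floor_ex = (hg * (i - 1)) // wg
--         ceil_cur = (hg * i) // wg
--         if (hg * i) % wg != 0:
--             ceil_cur += 1
--         rmv = ceil_cur - floor_ex
--         rmv_square += rmv
--
--     rmv_square *= g
--
--     return total_square - rmv_square
-- ===== SOURCE B (Python) =====
-- def solution(w, h):
--     # Euclid's algorithm + closed form: crossed squares = w + h - gcd(w, h)
--     a, b = w, h
--     while b:
--         a, b = b, a % b
--     return w * h - (w + h - a)
-- ===== Notes on version B (the rewrite author's own statement) =====
-- stated objective: faster
-- what changed: Replaces A's trial-division gcd (counting down from min(w,h)) and its per-column loop summing crossed cells with Euclid's gcd and the closed form w*h - (w + h - gcd(w,h)).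
import Mathlib
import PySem

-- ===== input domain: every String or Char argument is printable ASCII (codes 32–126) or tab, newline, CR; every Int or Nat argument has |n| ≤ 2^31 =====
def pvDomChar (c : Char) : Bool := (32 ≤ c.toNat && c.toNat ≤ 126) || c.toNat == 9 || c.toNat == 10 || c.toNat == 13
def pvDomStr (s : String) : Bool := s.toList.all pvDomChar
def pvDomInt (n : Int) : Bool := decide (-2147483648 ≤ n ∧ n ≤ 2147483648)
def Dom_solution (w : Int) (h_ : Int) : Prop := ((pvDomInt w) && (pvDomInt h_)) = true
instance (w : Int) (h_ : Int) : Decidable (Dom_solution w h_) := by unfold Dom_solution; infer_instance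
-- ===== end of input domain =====

-- B replaces A's trial-division gcd and per-column crossing loop with Euclid's gcd and the
-- closed form w*h - (w + h - gcd(w,h)) (objective: faster).

-- ===== PORT A =====
-- A's gcd: 'for i in range(a, 0, -1): if a % i == 0 and b % i == 0: return i'; falls off → None.
-- Fuel n is the current loop variable i (the loop counts down from a to 1; empty range → none).
def pyGcdGo (a b : Int) : Nat → Option Int
  | 0 => none
  | n + 1 =>
    if PySem.Int.mod a ((n : Int) + 1) = 0 ∧ PySem.Int.mod b ((n : Int) + 1) = 0
    then some ((n : Int) + 1) else pyGcdGo a b n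

def pyGcd (a b : Int) : Option Int := pyGcdGo a b a.toNat

-- the body of A's 'for i in range(1, wg + 1)' loop, line for line
def stepA (hg wg rmv_square i : Int) : Int :=
  let floor_ex := if i - 1 = 0 then 0 else PySem.Int.floordiv (hg * (i - 1)) wg
  let ceil_cur0 := PySem.Int.floordiv (hg * i) wg
  let ceil_cur := if PySem.Int.mod (hg * i) wg ≠ 0 then ceil_cur0 + 1 else ceil_cur0
  rmv_square + (ceil_cur - floor_ex)

def solution (w : Int) (h_ : Int) : Int :=
  let total_square := w * h_
  -- wh = [w, h]; wh.sort(); w = wh[0]; h = wh[1]  (two-element sort)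
  let w' := if w ≤ h_ then w else h_
  let h' := if w ≤ h_ then h_ else w
  match pyGcd w' h' with
  | none => 0  -- Python raises TypeError here (h // None); excluded by Pre_solution
  | some g =>
    let hg := PySem.Int.floordiv h' g
    let wg := PySem.Int.floordiv w' g
    let rmv_square := (PySem.List.pyRange 1 (wg + 1) 1).foldl (stepA hg wg) 0
    total_square - rmv_square * g

-- ===== PORT B =====
-- 'while b: a, b = b, a % b' — Euclid's algorithm, terminating since |a % b| < |b| for b ≠ 0.
def euclid (a b : Int) : Int :=
  if hb : b = 0 then a else euclid b (PySem.Int.mod a b)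
termination_by b.natAbs
decreasing_by
  rcases lt_or_gt_of_ne hb with hneg | hpos
  · have h1 := PySem.Int.mod_neg_bounds a hneg
    omega
  · have h1 := PySem.Int.mod_nonneg a hpos
    have h2 := PySem.Int.mod_lt a hpos
    omega

def solution_alt (w : Int) (h_ : Int) : Int :=
  w * h_ - (w + h_ - euclid w h_)

-- ===== PRECONDITION & SPEC =====
-- Pre_ excludes exactly the inputs where A raises: if min(w, h) ≤ 0, A's gcd helper returns
-- None and 'h // None' raises TypeError.
def Pre_solution (w : Int) (h_ : Int) : Prop := 1 ≤ w ∧ 1 ≤ h_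
instance (w : Int) (h_ : Int) : Decidable (Pre_solution w h_) := by unfold Pre_solution; infer_instance
def pvWitness_solution : Int × Int := (4, 6)

def Spec_solution (w : Int) (h_ : Int) (out : Int) : Prop := out = solution_alt w h_
instance (w : Int) (h_ : Int) (out : Int) : Decidable (Spec_solution w h_ out) := by unfold Spec_solution; infer_instance

-- ===== CLAIM (what is proved, stated in full; the proofs are below) =====
def Claim_equal_solution : Prop := ∀ (w : Int) (h_ : Int), Dom_solution w h_ → Pre_solution w h_ → Spec_solution w h_ (solution w h_)

-- ===== LEMMAS AND PROOFS =====

-- B's Euclid loop computes Int.gcd on nonnegative inputs.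
theorem euclid_eq_gcd (a b : Int) (ha : 0 ≤ a) (hb : 0 ≤ b) :
    euclid a b = Int.gcd a b := by
  by_cases h : b = 0
  · subst h
    rw [euclid]
    simp only [dif_pos]
    rw [Int.gcd_zero_right]
    omega
  · have hbpos : 0 < b := lt_of_le_of_ne hb (Ne.symm h)
    rw [euclid, dif_neg h, PySem.Int.mod_eq_emod_of_pos hbpos,
       euclid_eq_gcd b (a % b) hb (Int.emod_nonneg a h)]
    congr 1
    have h2 : ((a.natAbs % b.natAbs : Nat) : Int) = (a.natAbs : Int) % (b.natAbs : Int) := by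
      push_cast; ring
    have e1 : (a.natAbs : Int) = a := by omega
    have e2 : (b.natAbs : Int) = b := by omega
    rw [e1, e2] at h2
    have h1 : (a % b).natAbs = a.natAbs % b.natAbs := by omega
    show Nat.gcd b.natAbs (a % b).natAbs = Nat.gcd a.natAbs b.natAbs
    rw [h1, Nat.gcd_comm, ← Nat.gcd_rec]
    exact Nat.gcd_comm _ _
termination_by b.natAbs
decreasing_by
  have h1 := Int.emod_nonneg a h
  have h2 := Int.emod_lt_of_pos a hbpos
  omega

-- A's descending trial-division loop returns the gcd once the fuel reaches it.
theorem pyGcdGo_eq (a b : Int) (ha : 1 ≤ a) (n : Nat) (hn : Int.gcd a b ≤ n) :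
    pyGcdGo a b n = some ((Int.gcd a b : Nat) : Int) := by
  have hgpos : 0 < Int.gcd a b := Int.gcd_pos_of_ne_zero_left b (by omega)
  revert hn
  induction n with
  | zero => intro hn; omega
  | succ n ih =>
    intro hn
    rw [pyGcdGo]
    by_cases hcond : PySem.Int.mod a ((n : Int) + 1) = 0 ∧ PySem.Int.mod b ((n : Int) + 1) = 0
    · rw [if_pos hcond]
      have hia : ((n : Int) + 1) ∣ a := (PySem.Int.mod_eq_zero_iff_dvd a _).mp hcond.1
      have hib : ((n : Int) + 1) ∣ b := (PySem.Int.mod_eq_zero_iff_dvd b _).mp hcond.2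
      have hig : ((n : Int) + 1) ∣ ((Int.gcd a b : Nat) : Int) := by exact_mod_cast Int.dvd_gcd hia hib
      have hle : ((n : Int) + 1) ≤ ((Int.gcd a b : Nat) : Int) :=
        Int.le_of_dvd (by exact_mod_cast hgpos) hig
      have he : ((Int.gcd a b : Nat) : Int) = (n : Int) + 1 := by omega
      rw [← he]
    · rw [if_neg hcond]
      have hne : ((Int.gcd a b : Nat) : Int) ≠ (n : Int) + 1 := by
        intro he
        exact hcond ⟨by rw [PySem.Int.mod_eq_zero_iff_dvd, ← he]; exact Int.gcd_dvd_left a b,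
                     by rw [PySem.Int.mod_eq_zero_iff_dvd, ← he]; exact Int.gcd_dvd_right a b⟩
      exact ih (by omega)

theorem pyGcd_eval (a b : Int) (ha : 1 ≤ a) : pyGcd a b = some ((Int.gcd a b : Nat) : Int) := by
  apply pyGcdGo_eq a b ha
  have hd : Int.gcd a b ∣ a.natAbs := Nat.dvd_trans (Nat.gcd_dvd_left _ _) dvd_rfl
  have := Nat.le_of_dvd (by omega) hd
  omega

-- For coprime hg, wg and 1 ≤ i < wg, wg does not divide hg * i.
theorem key_not_dvd (hg wg i : Int) (hcop : Int.gcd hg wg = 1) (h1 : 1 ≤ i) (h2 : i < wg) :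
    PySem.Int.mod (hg * i) wg ≠ 0 := by
  rw [Ne, PySem.Int.mod_eq_zero_iff_dvd]
  intro hdvd
  have hcop' : IsCoprime wg hg := Int.isCoprime_iff_gcd_eq_one.mpr (by rw [Int.gcd_comm]; exact hcop)
  have hwi : wg ∣ i := hcop'.dvd_of_dvd_mul_left hdvd
  have := Int.le_of_dvd (by omega) hwi
  omega

theorem floordiv_zero_of_pos (wg : Int) (h : 0 < wg) : PySem.Int.floordiv 0 wg = 0 := by
  rw [PySem.Int.floordiv_eq_ediv_of_pos h]
  exact Int.zero_ediv wg

-- one loop step below wg: ceil_cur = floor + 1, floor_ex = floor of the previous column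
theorem stepA_eval_lt (hg wg acc i : Int) (hwg : 1 ≤ wg) (hcop : Int.gcd hg wg = 1)
    (h1 : 1 ≤ i) (h2 : i < wg) :
    stepA hg wg acc i
      = acc + (PySem.Int.floordiv (hg * i) wg + 1 - PySem.Int.floordiv (hg * (i - 1)) wg) := by
  unfold stepA
  simp only [if_pos (key_not_dvd hg wg i hcop h1 h2)]
  by_cases h0 : i - 1 = 0
  · rw [if_pos h0, h0, mul_zero, floordiv_zero_of_pos wg (by omega)]
  · rw [if_neg h0]

-- The crossing-count loop telescopes: partial sums strictly below wg.
theorem loop_partial (hg wg : Int) (hwg : 1 ≤ wg) (hcop : Int.gcd hg wg = 1)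
    (k : Nat) (hk : (k : Int) < wg) :
    (PySem.List.pyRange 1 ((k : Int) + 1) 1).foldl (stepA hg wg) 0
      = PySem.Int.floordiv (hg * k) wg + k := by
  induction k with
  | zero =>
    simp only [Nat.cast_zero, zero_add, mul_zero]
    rw [PySem.List.pyRange_one_eq_nil (by omega), List.foldl_nil,
       floordiv_zero_of_pos wg (by omega)]
    ring
  | succ k ih =>
    push_cast
    rw [PySem.List.pyRange_one_succ_right (by omega : (1 : Int) ≤ (k : Int) + 1),
       List.foldl_append, ih (by push_cast at hk; omega), List.foldl_cons, List.foldl_nil,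
       stepA_eval_lt hg wg _ ((k : Int) + 1) hwg hcop (by omega) (by push_cast at hk; omega)]
    have : ((k : Int) + 1) - 1 = (k : Int) := by ring
    rw [this]
    ring

-- Full loop value = hg + wg - 1.
theorem loop_total (hg wg : Int) (hwg : 1 ≤ wg) (hhg : 1 ≤ hg) (hcop : Int.gcd hg wg = 1) :
    (PySem.List.pyRange 1 (wg + 1) 1).foldl (stepA hg wg) 0 = hg + wg - 1 := by
  have hk : ((wg - 1).toNat : Int) = wg - 1 := by omega
  rw [show wg + 1 = ((wg - 1).toNat : Int) + 1 + 1 by omega,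
     PySem.List.pyRange_one_succ_right (by omega), List.foldl_append,
     loop_partial hg wg hwg hcop (wg - 1).toNat (by omega),
     List.foldl_cons, List.foldl_nil]
  -- last step: i = wg = ↑(wg-1).toNat + 1
  unfold stepA
  have hi : ((wg - 1).toNat : Int) + 1 = wg := by omega
  rw [hi]
  have hdvd : wg ∣ hg * wg := Dvd.intro_left hg rfl
  have hmod : PySem.Int.mod (hg * wg) wg = 0 := (PySem.Int.mod_eq_zero_iff_dvd _ _).mpr hdvd
  simp only [hmod, ne_eq, not_true_eq_false, if_false]
  have hdiv : PySem.Int.floordiv (hg * wg) wg = hg := by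
    rw [PySem.Int.floordiv_eq_ediv_of_pos (by omega)]
    exact Int.mul_ediv_cancel hg (by omega)
  rw [hdiv]
  by_cases h0 : wg - 1 = 0
  · rw [if_pos h0, h0]
    norm_num [floordiv_zero_of_pos wg (by omega)]
    omega
  · rw [if_neg h0, hk]
    ring

-- A's whole body in closed form on the precondition.
theorem core_loop (w' h' : Int) (h1 : 1 ≤ w') (h12 : w' ≤ h') :
    ((PySem.List.pyRange 1 (PySem.Int.floordiv w' ((Int.gcd w' h' : Nat) : Int) + 1) 1).foldl
       (stepA (PySem.Int.floordiv h' ((Int.gcd w' h' : Nat) : Int))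
              (PySem.Int.floordiv w' ((Int.gcd w' h' : Nat) : Int))) 0)
      * ((Int.gcd w' h' : Nat) : Int)
      = w' + h' - ((Int.gcd w' h' : Nat) : Int) := by
  have hgpos : 0 < ((Int.gcd w' h' : Nat) : Int) := by
    exact_mod_cast Int.gcd_pos_of_ne_zero_left h' (show w' ≠ 0 by omega)
  set g : Int := ((Int.gcd w' h' : Nat) : Int) with hg_def
  have hdw : g ∣ w' := Int.gcd_dvd_left w' h'
  have hdh : g ∣ h' := Int.gcd_dvd_right w' h'
  have hww : g * PySem.Int.floordiv w' g = w' := by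
    rw [PySem.Int.floordiv_eq_ediv_of_pos hgpos]; exact Int.mul_ediv_cancel' hdw
  have hhh : g * PySem.Int.floordiv h' g = h' := by
    rw [PySem.Int.floordiv_eq_ediv_of_pos hgpos]; exact Int.mul_ediv_cancel' hdh
  have hwg1 : 1 ≤ PySem.Int.floordiv w' g := by nlinarith [hww, hhh]
  have hhg1 : 1 ≤ PySem.Int.floordiv h' g := by nlinarith [hww, hhh]
  have hcop : Int.gcd (PySem.Int.floordiv h' g) (PySem.Int.floordiv w' g) = 1 := by
    rw [PySem.Int.floordiv_eq_ediv_of_pos hgpos, PySem.Int.floordiv_eq_ediv_of_pos hgpos, hg_def,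
      Int.gcd_comm w' h']
    exact Int.gcd_div_gcd_div_gcd (Int.gcd_pos_of_ne_zero_left w' (by omega : h' ≠ 0))
  rw [loop_total _ _ hwg1 hhg1 hcop]
  nlinarith [hww, hhh]

theorem solution_closed (w h_ : Int) (hw : 1 ≤ w) (hh : 1 ≤ h_) :
    solution w h_ = w * h_ - (w + h_ - ((Int.gcd w h_ : Nat) : Int)) := by
  by_cases hle : w ≤ h_
  · simp only [solution, if_pos hle, pyGcd_eval w h_ hw]
    rw [core_loop w h_ hw hle]
  · simp only [solution, if_neg hle, pyGcd_eval h_ w hh]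
    rw [core_loop h_ w hh (by omega), Int.gcd_comm h_ w]
    ring

-- ===== VERDICT (by name: the statement is the Claim_ definition above) =====
theorem solution_spec : Claim_equal_solution := by
  intro w h_ _ hpre
  obtain ⟨hw, hh⟩ := hpre
  unfold Spec_solution solution_alt
  rw [solution_closed w h_ hw hh, euclid_eq_gcd w h_ (by omega : (0:Int) ≤ w) (by omega : (0:Int) ≤ h_)]
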